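-- pv_equiv track=rewrite | github.com/brianlo06/circuit-classifier | topology/circuit_classifier.py | _project_rows
-- ===== SOURCE A (Python) =====
-- from typing import Dict, List, Optional, Tuple
--
-- def _project_rows(
--     rows: List[Dict[str, int]],
--     input_names: List[str],
--     output_names: List[str],
-- ) -> List[Dict[str, int]]:
--     projected: List[Dict[str, int]] = []
--     seen = set()
--     for row in rows:
--         key = tuple(row[name] for name in input_names)
--         if key in seen:
--             continue
--         seen.add(key)
--         projected.append({name: row[name] for name in input_names + output_names})
--     projected.sort(key=lambda item: tuple(item[name] for name in input_names))
--     return projected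
-- ===== SOURCE B (Python) =====
-- def _project_rows(rows, input_names, output_names):
--     names = input_names + output_names
--     key_of = lambda item: tuple(item[n] for n in input_names)
--     ordered = sorted([{n: row[n] for n in names} for row in rows], key=key_of)
--     result = []
--     i = 0
--     n = len(ordered)
--     while i < n:
--         head = ordered[i]
--         result.append(head)
--         i += 1
--         while i < n and key_of(ordered[i]) == key_of(head):
--             i += 1
--     return result
-- ===== Notes on version B (the rewrite author's own statement) =====
-- stated objective: alternative
-- what changed: Replaces A's hash-set dedup-then-sort with: project every row, stable sort by input key, then a group-skipping scan that keeps the head of each equal-key run (stability keeps the first original row per key).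
-- outside the precondition, e.g. on _project_rows([{'a': 0, 'b': 1}, {'a': 0}], ['a'], ['b']): A returns [{'a': 0, 'b': 1}], B raises KeyError
import Mathlib
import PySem

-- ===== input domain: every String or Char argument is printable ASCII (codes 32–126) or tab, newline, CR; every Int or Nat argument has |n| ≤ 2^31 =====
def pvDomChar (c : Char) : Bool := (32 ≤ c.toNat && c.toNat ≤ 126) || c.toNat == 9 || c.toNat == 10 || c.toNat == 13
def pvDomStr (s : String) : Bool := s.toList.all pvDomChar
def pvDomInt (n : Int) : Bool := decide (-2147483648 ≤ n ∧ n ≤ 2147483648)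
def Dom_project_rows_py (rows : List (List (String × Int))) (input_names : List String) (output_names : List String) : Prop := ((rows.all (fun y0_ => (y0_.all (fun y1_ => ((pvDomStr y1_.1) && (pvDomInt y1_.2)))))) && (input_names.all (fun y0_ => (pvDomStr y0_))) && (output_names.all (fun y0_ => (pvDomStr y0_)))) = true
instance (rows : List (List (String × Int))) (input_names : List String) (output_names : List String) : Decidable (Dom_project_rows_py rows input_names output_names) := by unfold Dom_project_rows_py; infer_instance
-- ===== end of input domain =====

-- B replaces A's hash-set dedup followed by a sort with: project every row, stable-sort by input key,
-- then a group-skipping scan keeping the head of each equal-key run; equal cost, different algorithm.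

-- ===== PORT A =====
-- tuple(row[name] for name in input_names)  (rows/items are Python dicts, held as their item lists)
def pvKey (input_names : List String) (item : List (String × Int)) : List Int :=
  input_names.map (fun n => (PySem.Dict.mk item).getD n 0)

-- {name: row[name] for name in names}, returned as the dict's item list
def pvProj (row : List (String × Int)) (names : List String) : List (String × Int) :=
  (names.foldl (fun d n => d.insert n ((PySem.Dict.mk row).getD n 0)) PySem.Dict.empty).items

def project_rows_py (rows : List (List (String × Int))) (input_names : List String) (output_names : List String) : List (List (String × Int)) :=
  let res := rows.foldl (fun st row =>
      let key := pvKey input_names row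
      if key ∈ st.2 then st
      else (st.1 ++ [pvProj row (input_names ++ output_names)], st.2.add key))
    (([] : List (List (String × Int))), (PySem.Set.ofList ([] : List (List Int))))
  PySem.List.sorted res.1 (pvKey input_names)

-- ===== PORT B =====
-- the outer while-loop of Source B on the remaining suffix of 'ordered': keep the head of the current
-- equal-key run, then advance past the rest of the run ('while … key_of(ordered[i]) == key_of(head)')
def pvFirsts (input_names : List String) : List (List (String × Int)) → List (List (String × Int))
  | [] => []
  | head :: rest =>
      head :: pvFirsts input_names
        (rest.dropWhile (fun y => pvKey input_names y == pvKey input_names head))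
termination_by l => l.length
decreasing_by
  simp only [List.length_cons]
  exact Nat.lt_succ_of_le (List.length_dropWhile_le _ _)

def project_rows_py_alt (rows : List (List (String × Int))) (input_names : List String) (output_names : List String) : List (List (String × Int)) :=
  let names := input_names ++ output_names
  let ordered := PySem.List.sorted (rows.map (fun row => pvProj row names)) (pvKey input_names)
  pvFirsts input_names ordered

-- ===== PRECONDITION & SPEC =====
-- Pre_ requires every input/output name to be a key of every row: a missing name makes Python raise KeyError
-- on the row it projects — except that A skips projecting rows whose input key is a duplicate, so on a
-- duplicate-key row missing only an output name A still returns while the natural B raises; those inputs are excluded.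
def Pre_project_rows_py (rows : List (List (String × Int))) (input_names : List String) (output_names : List String) : Prop :=
  ∀ row ∈ rows, ∀ n ∈ input_names ++ output_names, ((PySem.Dict.mk row).get? n).isSome = true
instance (rows : List (List (String × Int))) (input_names : List String) (output_names : List String) : Decidable (Pre_project_rows_py rows input_names output_names) := by unfold Pre_project_rows_py; infer_instance
def pvWitness_project_rows_py : (List (List (String × Int))) × List String × List String :=
  ([[("a", 1), ("b", 2)], [("a", 1), ("b", 3)], [("a", 0), ("b", 5)]], ["a"], ["b"])

def Spec_project_rows_py (rows : List (List (String × Int))) (input_names : List String) (output_names : List String) (out : List (List (String × Int))) : Prop := out = project_rows_py_alt rows input_names output_names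
instance (rows : List (List (String × Int))) (input_names : List String) (output_names : List String) (out : List (List (String × Int))) : Decidable (Spec_project_rows_py rows input_names output_names out) := by unfold Spec_project_rows_py; infer_instance

-- ===== CLAIM (what is proved, stated in full; the proofs are below) =====
def Claim_equal_project_rows_py : Prop := ∀ (rows : List (List (String × Int))) (input_names : List String) (output_names : List String), Dom_project_rows_py rows input_names output_names → Pre_project_rows_py rows input_names output_names → Spec_project_rows_py rows input_names output_names (project_rows_py rows input_names output_names)

-- ===== LEMMAS AND PROOFS =====

-- first-seen dedup by key (A's seen-set loop, with the set as a cons list)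
def pvDedup {α κ : Type} [LinearOrder κ] (key : α → κ) (seen : List κ) : List α → List α
  | [] => []
  | x :: xs => if key x ∈ seen then pvDedup key seen xs else x :: pvDedup key (key x :: seen) xs

-- adjacent dedup by key (proof-side reformulation of B's group-skipping scan)
def pvAdj {α κ : Type} [LinearOrder κ] (key : α → κ) (prev : Option κ) : List α → List α
  | [] => []
  | x :: xs => if some (key x) ≠ prev then x :: pvAdj key (some (key x)) xs else pvAdj key prev xs

-- first element of l whose key is k
def pvFirst {α κ : Type} [LinearOrder κ] (key : α → κ) (l : List α) (k : κ) : Option α :=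
  (l.filter (fun b => decide (key b = k))).head?

theorem pv_firsts_dropWhile_eq_adj (inp : List String) (l : List (List (String × Int))) (k : List Int) :
    pvFirsts inp (l.dropWhile (fun y => pvKey inp y == k)) = pvAdj (pvKey inp) (some k) l := by
  induction l generalizing k with
  | nil => simp [pvFirsts, pvAdj]
  | cons y ys ih =>
    by_cases h : pvKey inp y = k
    · rw [List.dropWhile_cons_of_pos (by simpa using h)]
      simp only [pvAdj]
      rw [if_neg (by simp [h]), ih]
    · rw [List.dropWhile_cons_of_neg (by simpa using h)]
      simp only [pvFirsts, pvAdj]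
      rw [if_pos (by simp [h]), ih]

theorem pv_firsts_eq_adj (inp : List String) (l : List (List (String × Int))) :
    pvFirsts inp l = pvAdj (pvKey inp) none l := by
  cases l with
  | nil => simp [pvFirsts, pvAdj]
  | cons x xs =>
    simp only [pvFirsts, pvAdj]
    rw [if_pos (by simp), pv_firsts_dropWhile_eq_adj]

theorem pv_first_cons_self {α κ : Type} [LinearOrder κ] (key : α → κ) (x : α) (xs : List α) :
    pvFirst key (x :: xs) (key x) = some x := by
  simp [pvFirst]

theorem pv_first_cons_ne {α κ : Type} [LinearOrder κ] (key : α → κ) (x : α) (xs : List α)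
    (k : κ) (h : key x ≠ k) : pvFirst key (x :: xs) k = pvFirst key xs k := by
  simp [pvFirst, h]

theorem pv_first_eq_some {α κ : Type} [LinearOrder κ] (key : α → κ) (l : List α) (k : κ) (a : α)
    (h : pvFirst key l k = some a) : a ∈ l ∧ key a = k := by
  unfold pvFirst at h
  cases hl : l.filter (fun b => decide (key b = k)) with
  | nil => rw [hl] at h; simp at h
  | cons b bs =>
    rw [hl] at h
    simp only [List.head?_cons, Option.some_inj] at h
    have hb : b ∈ l.filter (fun c => decide (key c = k)) := by
      rw [hl]; exact List.mem_cons_self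
    have hm := List.mem_filter.mp hb
    cases h
    exact ⟨hm.1, by simpa using hm.2⟩

theorem pv_foldlA (input_names : List String) (names : List String)
    (rows : List (List (String × Int))) (acc : List (List (String × Int)))
    (s : PySem.Set (List Int)) (seen : List (List Int)) (hms : ∀ k, k ∈ s ↔ k ∈ seen) :
    (rows.foldl (fun st row =>
      let key := pvKey input_names row
      if key ∈ st.2 then st
      else (st.1 ++ [pvProj row names], st.2.add key)) (acc, s)).1
    = acc ++ (pvDedup (pvKey input_names) seen rows).map (fun row => pvProj row names) := by
  induction rows generalizing acc s seen with
  | nil => simp [pvDedup]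
  | cons x xs ih =>
    rw [List.foldl_cons]
    dsimp only
    by_cases h : pvKey input_names x ∈ seen
    · rw [if_pos ((hms _).mpr h)]
      simp only [pvDedup]
      rw [if_pos h]
      exact ih acc s seen hms
    · rw [if_neg (fun hh => h ((hms _).mp hh))]
      simp only [pvDedup]
      rw [if_neg h]
      rw [ih (acc ++ [pvProj x names]) (s.add (pvKey input_names x)) (pvKey input_names x :: seen)
        (fun k => by rw [PySem.Set.mem_add]; simp [hms k, or_comm])]
      simp

theorem pv_filter_insertBy {α κ : Type} [LinearOrder κ] (key : α → κ) (k : κ) (x : α)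
    (ys : List α) (hs : ys.Pairwise (fun a b => key a ≤ key b)) :
    (PySem.List.insertBy (fun a b => decide (key a < key b)) x ys).filter (fun a => decide (key a = k))
    = ys.filter (fun a => decide (key a = k)) ++ if key x = k then [x] else [] := by
  induction ys with
  | nil =>
    simp only [PySem.List.insertBy, List.filter_nil, List.nil_append]
    by_cases hxk : key x = k <;> simp [hxk]
  | cons y ys ih =>
    rw [List.pairwise_cons] at hs
    obtain ⟨hs1, hs2⟩ := hs
    simp only [PySem.List.insertBy]
    by_cases hb : key x < key y
    · rw [if_pos (by simpa using hb)]
      by_cases hxk : key x = k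
      · have hnil : (y :: ys).filter (fun a => decide (key a = k)) = [] := by
          apply List.filter_eq_nil_iff.mpr
          intro a ha
          simp only [decide_eq_true_eq]
          intro he
          have hge : key y ≤ key a := by
            rcases List.mem_cons.mp ha with rfl | ha'
            · exact le_refl _
            · exact hs1 a ha'
          have hlt := lt_of_lt_of_le hb hge
          rw [he, hxk] at hlt
          exact lt_irrefl k hlt
        rw [List.filter_cons, hnil, if_pos hxk]
        simp [hxk]
      · rw [if_neg hxk, List.append_nil, List.filter_cons, if_neg (by simpa using hxk)]
    · rw [if_neg (by simpa using hb)]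
      rw [List.filter_cons, List.filter_cons, ih hs2]
      split <;> simp

theorem pv_filter_sorted {α κ : Type} [LinearOrder κ] (key : α → κ) (xs : List α) (k : κ) :
    (PySem.List.sorted xs key).filter (fun a => decide (key a = k))
    = xs.filter (fun a => decide (key a = k)) := by
  induction xs using List.reverseRecOn with
  | nil => simp [PySem.List.sorted_eq_foldl_insertBy]
  | append_singleton xs x ih =>
    have h1 : PySem.List.sorted (xs ++ [x]) key
        = PySem.List.insertBy (fun a b => decide (key a < key b)) x (PySem.List.sorted xs key) := by
      rw [PySem.List.sorted_eq_foldl_insertBy, PySem.List.sorted_eq_foldl_insertBy, List.foldl_append]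
      rfl
    rw [h1, pv_filter_insertBy key k x _ (PySem.List.sorted_pairwise xs key), ih,
      List.filter_append]
    by_cases hxk : key x = k <;> simp [hxk]

theorem pv_first_sorted {α κ : Type} [LinearOrder κ] (key : α → κ) (xs : List α) (k : κ) :
    pvFirst key (PySem.List.sorted xs key) k = pvFirst key xs k := by
  unfold pvFirst
  rw [pv_filter_sorted]

theorem pv_adj_mem_ge {α κ : Type} [LinearOrder κ] (key : α → κ) (k0 : κ)
    (xs : List α) (hs : xs.Pairwise (fun a b => key a ≤ key b)) (hge : ∀ y ∈ xs, k0 ≤ key y) :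
    ∀ a ∈ pvAdj key (some k0) xs, k0 < key a := by
  induction xs generalizing k0 with
  | nil => simp [pvAdj]
  | cons x xs ih =>
    rw [List.pairwise_cons] at hs
    obtain ⟨hs1, hs2⟩ := hs
    simp only [pvAdj]
    by_cases h : some (key x) ≠ some k0
    · rw [if_pos h]
      intro a ha
      rcases List.mem_cons.mp ha with rfl | ha
      · exact lt_of_le_of_ne (hge a (by simp)) (fun he => h (by rw [he]))
      · exact lt_of_le_of_lt (hge x (by simp)) (ih (key x) hs2 hs1 a ha)
    · rw [if_neg h]
      push_neg at h
      have hk : key x = k0 := by injection h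
      exact ih k0 hs2 (fun y hy => hk ▸ hs1 y hy)

theorem pv_adj_pairwise_lt {α κ : Type} [LinearOrder κ] (key : α → κ)
    (prev : Option κ) (xs : List α) (hs : xs.Pairwise (fun a b => key a ≤ key b)) :
    (pvAdj key prev xs).Pairwise (fun a b => key a < key b) := by
  induction xs generalizing prev with
  | nil => simp [pvAdj]
  | cons x xs ih =>
    rw [List.pairwise_cons] at hs
    obtain ⟨hs1, hs2⟩ := hs
    simp only [pvAdj]
    by_cases h : some (key x) ≠ prev
    · rw [if_pos h]
      exact List.Pairwise.cons (fun b hb => pv_adj_mem_ge key (key x) xs hs2 hs1 b hb) (ih _ hs2)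
    · rw [if_neg h]
      exact ih _ hs2

theorem pv_adj_mem_some {α κ : Type} [LinearOrder κ] (key : α → κ) (k0 : κ)
    (xs : List α) (hs : xs.Pairwise (fun a b => key a ≤ key b)) (hge : ∀ y ∈ xs, k0 ≤ key y) (a : α) :
    a ∈ pvAdj key (some k0) xs ↔ key a ≠ k0 ∧ pvFirst key xs (key a) = some a := by
  induction xs generalizing k0 with
  | nil => simp [pvAdj, pvFirst]
  | cons y ys ih =>
    rw [List.pairwise_cons] at hs
    obtain ⟨hs1, hs2⟩ := hs
    simp only [pvAdj]
    by_cases hyk : key y = k0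
    · rw [if_neg (by simp [hyk])]
      rw [ih k0 hs2 (fun z hz => hyk ▸ hs1 z hz)]
      apply and_congr_right
      intro hne
      rw [pv_first_cons_ne key y ys (key a) (by rw [hyk]; exact fun he => hne he.symm)]
    · rw [if_pos (by simp [hyk])]
      rw [List.mem_cons, ih (key y) hs2 hs1]
      constructor
      · rintro (rfl | ⟨hne, hf⟩)
        · exact ⟨hyk, pv_first_cons_self key a ys⟩
        · obtain ⟨hmem, _⟩ := pv_first_eq_some key ys (key a) a hf
          have hya : key y < key a := lt_of_le_of_ne (hs1 a hmem) (fun he => hne he.symm)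
          have hk0a : k0 < key a := lt_of_le_of_lt (hge y (by simp)) hya
          exact ⟨ne_of_gt hk0a, by rw [pv_first_cons_ne key y ys (key a) (ne_of_lt hya)]; exact hf⟩
      · rintro ⟨hne, hf⟩
        by_cases hay : key a = key y
        · left
          rw [hay, pv_first_cons_self key y ys] at hf
          exact (Option.some_inj.mp hf).symm
        · right
          rw [pv_first_cons_ne key y ys (key a) (fun he => hay he.symm)] at hf
          exact ⟨fun he => hay he, hf⟩

theorem pv_adj_mem {α κ : Type} [LinearOrder κ] (key : α → κ)
    (xs : List α) (hs : xs.Pairwise (fun a b => key a ≤ key b)) (a : α) :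
    a ∈ pvAdj key none xs ↔ pvFirst key xs (key a) = some a := by
  cases xs with
  | nil => simp [pvAdj, pvFirst]
  | cons x xs =>
    rw [List.pairwise_cons] at hs
    obtain ⟨hs1, hs2⟩ := hs
    simp only [pvAdj, if_pos (by simp : some (key x) ≠ (none : Option κ))]
    rw [List.mem_cons, pv_adj_mem_some key (key x) xs hs2 hs1]
    constructor
    · rintro (rfl | ⟨hne, hf⟩)
      · exact pv_first_cons_self key a xs
      · rw [pv_first_cons_ne key x xs (key a) (fun he => hne he.symm)]
        exact hf
    · intro hf
      by_cases hax : key a = key x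
      · left
        rw [hax, pv_first_cons_self key x xs] at hf
        exact (Option.some_inj.mp hf).symm
      · right
        rw [pv_first_cons_ne key x xs (key a) (fun he => hax he.symm)] at hf
        exact ⟨hax, hf⟩

theorem pv_dedup_mem {α κ : Type} [LinearOrder κ] (key : α → κ) (seen : List κ) (l : List α) (a : α) :
    a ∈ pvDedup key seen l ↔ key a ∉ seen ∧ pvFirst key l (key a) = some a := by
  induction l generalizing seen with
  | nil => simp [pvDedup, pvFirst]
  | cons x xs ih =>
    simp only [pvDedup]
    by_cases h : key x ∈ seen
    · rw [if_pos h, ih]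
      apply and_congr_right
      intro hnotin
      rw [pv_first_cons_ne key x xs (key a) (fun he => hnotin (he ▸ h))]
    · rw [if_neg h, List.mem_cons, ih]
      constructor
      · rintro (rfl | ⟨hnotin, hf⟩)
        · exact ⟨h, pv_first_cons_self key a xs⟩
        · rw [List.mem_cons] at hnotin
          push_neg at hnotin
          exact ⟨hnotin.2, by rw [pv_first_cons_ne key x xs (key a) (fun he => hnotin.1 he.symm)]; exact hf⟩
      · rintro ⟨hnotin, hf⟩
        by_cases hax : key a = key x
        · left
          rw [hax, pv_first_cons_self key x xs] at hf
          exact (Option.some_inj.mp hf).symm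
        · right
          rw [pv_first_cons_ne key x xs (key a) (fun he => hax he.symm)] at hf
          refine ⟨?_, hf⟩
          rw [List.mem_cons]
          push_neg
          exact ⟨hax, hnotin⟩

theorem pv_dedup_pairwise_ne {α κ : Type} [LinearOrder κ] (key : α → κ) (seen : List κ) (l : List α) :
    (pvDedup key seen l).Pairwise (fun a b => key a ≠ key b) := by
  induction l generalizing seen with
  | nil => simp [pvDedup]
  | cons x xs ih =>
    simp only [pvDedup]
    split
    · exact ih seen
    · refine List.Pairwise.cons (fun b hb => ?_) (ih _)
      have hb' : key b ∉ key x :: seen := ((pv_dedup_mem key _ xs b).mp hb).1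
      exact fun he => hb' (by rw [← he]; exact List.mem_cons_self)

theorem pv_map_dedup {α β κ : Type} [LinearOrder κ] (keyA : α → κ) (keyB : β → κ) (f : α → β)
    (hk : ∀ a, keyB (f a) = keyA a) (seen : List κ) (l : List α) :
    (pvDedup keyA seen l).map f = pvDedup keyB seen (l.map f) := by
  induction l generalizing seen with
  | nil => simp [pvDedup]
  | cons x xs ih =>
    simp only [List.map_cons, pvDedup, hk]
    split
    · exact ih seen
    · rw [List.map_cons, ih]

theorem pv_getD_foldl_insert (names : List String) (v : String → Int) (d : PySem.Dict String Int) (m : String) :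
    (names.foldl (fun d n => d.insert n (v n)) d).getD m 0 = if m ∈ names then v m else d.getD m 0 := by
  induction names generalizing d with
  | nil => simp
  | cons n ns ih =>
    rw [List.foldl_cons, ih]
    by_cases h1 : m ∈ ns
    · simp [h1]
    · by_cases h2 : m = n
      · subst h2
        simp
      · simp [h1, h2, PySem.Dict.getD_insert]

theorem pv_key_proj (input_names names : List String) (row : List (String × Int))
    (hsub : ∀ n ∈ input_names, n ∈ names) :
    pvKey input_names (pvProj row names) = pvKey input_names row := by
  unfold pvKey pvProj
  apply List.map_congr_left
  intro n hn
  have h0 : PySem.Dict.mk ((names.foldl (fun d m => d.insert m ((PySem.Dict.mk row).getD m 0)) PySem.Dict.empty).items)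
      = names.foldl (fun d m => d.insert m ((PySem.Dict.mk row).getD m 0)) PySem.Dict.empty := rfl
  rw [h0, pv_getD_foldl_insert names (fun m => (PySem.Dict.mk row).getD m 0) PySem.Dict.empty n,
    if_pos (hsub n hn)]

theorem pv_sorted_di {α κ : Type} [LT κ] (d1 d2 : DecidableLT κ) (xs : List α) (key : α → κ) :
    @PySem.List.sorted α κ _ d1 xs key false = @PySem.List.sorted α κ _ d2 xs key false := by
  rw [@PySem.List.sorted_eq_foldl_insertBy α κ _ d1 xs key,
    @PySem.List.sorted_eq_foldl_insertBy α κ _ d2 xs key]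
  congr 1
  funext acc x
  congr 1
  funext a b
  exact decide_eq_decide.mpr Iff.rfl

-- the port elaborates '<' on List Int through core instances; the PySem order lemmas through the
-- Mathlib LinearOrder; the two compute the same order, so sorted agrees
theorem pv_sorted_bridge (xs : List (List (String × Int))) (key : List (String × Int) → List Int) :
    PySem.List.sorted xs key
    = @PySem.List.sorted _ _ List.instLinearOrder.toLT LinearOrder.toDecidableLT xs key false :=
  pv_sorted_di _ _ xs key

-- ===== VERDICT (by name: the statement is the Claim_ definition above) =====
theorem project_rows_py_spec : Claim_equal_project_rows_py := by
  intro rows input_names output_names _dom _pre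
  unfold Spec_project_rows_py
  have eA : project_rows_py rows input_names output_names
      = PySem.List.sorted
          (pvDedup (pvKey input_names) []
            (rows.map (fun row => pvProj row (input_names ++ output_names))))
          (pvKey input_names) := by
    simp only [project_rows_py]
    rw [pv_foldlA input_names (input_names ++ output_names) rows []
        (PySem.Set.ofList ([] : List (List Int))) []
        (fun k => by rw [PySem.Set.mem_ofList]),
      pv_map_dedup (pvKey input_names) (pvKey input_names)
        (fun row => pvProj row (input_names ++ output_names))
        (fun row => pv_key_proj input_names (input_names ++ output_names) row
          (fun n hn => List.mem_append_left _ hn)) [] rows]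
    rfl
  have eB : project_rows_py_alt rows input_names output_names
      = pvAdj (pvKey input_names) none
          (PySem.List.sorted (rows.map (fun row => pvProj row (input_names ++ output_names)))
            (pvKey input_names)) := by
    simp only [project_rows_py_alt]
    rw [pv_firsts_eq_adj]
  rw [eA, eB,
    pv_sorted_bridge (pvDedup (pvKey input_names) []
      (rows.map (fun row => pvProj row (input_names ++ output_names)))) (pvKey input_names),
    pv_sorted_bridge (rows.map (fun row => pvProj row (input_names ++ output_names)))
      (pvKey input_names)]
  have hsp := PySem.List.sorted_pairwise
    (rows.map (fun row => pvProj row (input_names ++ output_names))) (pvKey input_names)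
  have hlt := pv_adj_pairwise_lt (pvKey input_names) none _ hsp
  have n1 := hlt.imp (fun h => ne_of_apply_ne (pvKey input_names) (ne_of_lt h))
  have n2 := (pv_dedup_pairwise_ne (pvKey input_names) []
      (rows.map (fun row => pvProj row (input_names ++ output_names)))).imp
    (fun h => ne_of_apply_ne (pvKey input_names) h)
  exact PySem.List.sorted_eq_of_perm_of_pairwise_lt _ _ _
    ((List.perm_ext_iff_of_nodup n1 n2).mpr (fun a => by
      rw [pv_adj_mem _ _ hsp a, pv_first_sorted, pv_dedup_mem]
      simp)) hlt
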